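-- pv_equiv track=rewrite | github.com/inasafe/inasafe | safe/report/extractors/analysis_provenance_details.py | sorted_keywords_by_order
-- ===== SOURCE A (Python) =====
-- from collections import OrderedDict
--
-- def sorted_keywords_by_order(keywords, order):
--     """Sort keywords based on defined order.
--
--     :param keywords: Keyword to be sorted.
--     :type keywords: dict
--
--     :param order: Ordered list of key.
--     :type order: list
--
--     :return: Ordered dictionary based on order list.
--     :rtype: OrderedDict
--     """
--
--     # we need to delete item with no value
--     for key, value in list(keywords.items()):
--         if value is None:
--             del keywords[key]
--
--     ordered_keywords = OrderedDict()
--     for key in order: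
--         if key in list(keywords.keys()):
--             ordered_keywords[key] = keywords.get(key)
--
--     for keyword in keywords:
--         if keyword not in order:
--             ordered_keywords[keyword] = keywords.get(keyword)
--
--     return ordered_keywords
-- ===== SOURCE B (Python) =====
-- from collections import OrderedDict
--
-- def sorted_keywords_by_order(keywords, order):
--     """Rank-and-sort re-implementation: delete None-valued entries (same
--     in-place mutation as the original), then order the surviving keys with one
--     stable sort keyed by (position in `order`, insertion index)."""
--     for key in [k for k, v in keywords.items() if v is None]:
--         del keywords[key]
--     pos = {}
--     for i, key in enumerate(order):
--         pos.setdefault(key, i)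
--     tie = {key: i for i, key in enumerate(keywords)}
--     n = len(order)
--     keys = sorted(keywords, key=lambda k: (pos.get(k, n), tie[k]))
--     return OrderedDict((k, keywords[k]) for k in keys)
-- ===== Notes on version B (the rewrite author's own statement) =====
-- stated objective: faster
-- what changed: A builds the ordered dict in two concatenated passes with a linear `key in list(keywords.keys())` / `keyword not in order` scan inside each loop iteration; B ranks every surviving key by (first position in `order`, insertion index) via two dicts built once and produces the result with one stable sort of the keys.
import Mathlib
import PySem

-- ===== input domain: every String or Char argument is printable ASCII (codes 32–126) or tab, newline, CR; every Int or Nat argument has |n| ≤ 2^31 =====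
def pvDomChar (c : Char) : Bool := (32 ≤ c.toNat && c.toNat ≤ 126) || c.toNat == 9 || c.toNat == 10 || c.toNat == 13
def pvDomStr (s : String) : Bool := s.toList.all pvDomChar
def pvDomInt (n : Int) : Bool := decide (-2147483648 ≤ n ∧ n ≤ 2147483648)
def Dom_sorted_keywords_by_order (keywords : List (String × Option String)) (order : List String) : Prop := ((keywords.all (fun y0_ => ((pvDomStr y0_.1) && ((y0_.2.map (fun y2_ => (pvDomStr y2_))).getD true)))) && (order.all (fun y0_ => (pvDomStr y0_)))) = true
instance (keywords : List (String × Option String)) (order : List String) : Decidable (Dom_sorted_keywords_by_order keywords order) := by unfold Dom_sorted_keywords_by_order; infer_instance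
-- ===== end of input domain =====

-- B replaces A's two concatenated passes (each with a linear membership scan per iteration) by
-- one stable sort of the surviving keys under the rank key (first position in `order`, insertion
-- index) built from dicts; objective: faster (measured). Both A and B also delete None-valued
-- entries from the `keywords` dict in place; the equivalence proved here is about the return value.

-- ===== PORT A =====
def sorted_keywords_by_order (keywords : List (String × Option String)) (order : List String) : List (String × String) :=
  -- for key, value in list(keywords.items()): if value is None: del keywords[key]
  let kw : PySem.Dict String (Option String) :=
    keywords.foldl (fun d kv => if kv.2 == none then d.erase kv.1 else d) (PySem.Dict.mk keywords)
  -- ordered_keywords = OrderedDict(); for key in order: if key in list(keywords.keys()): ordered_keywords[key] = keywords.get(key)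
  -- (keywords.get(key) is a present, non-None value here, so the getD defaults are never used)
  let ordered : PySem.Dict String String :=
    order.foldl (fun od key =>
      if key ∈ kw.keys then od.insert key (((kw.get? key).getD none).getD "") else od)
      PySem.Dict.empty
  -- for keyword in keywords: if keyword not in order: ordered_keywords[keyword] = keywords.get(keyword)
  let ordered2 : PySem.Dict String String :=
    kw.keys.foldl (fun od k =>
      if k ∈ order then od else od.insert k (((kw.get? k).getD none).getD "")) ordered
  ordered2.items

-- ===== PORT B =====
def sorted_keywords_by_order_alt (keywords : List (String × Option String)) (order : List String) : List (String × String) :=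
  -- for key in [k for k, v in keywords.items() if v is None]: del keywords[key]
  let delKeys : List String := (keywords.filter (fun kv => kv.2 == none)).map (fun kv => kv.1)
  let kw : PySem.Dict String (Option String) := delKeys.foldl (fun d k => d.erase k) (PySem.Dict.mk keywords)
  -- pos = {}; for i, key in enumerate(order): pos.setdefault(key, i)
  let pos : PySem.Dict String Int :=
    (PySem.List.enumerate order).foldl (fun d q => d.setdefault q.2 q.1) PySem.Dict.empty
  -- tie = {key: i for i, key in enumerate(keywords)}
  let tie : PySem.Dict String Int :=
    (PySem.List.enumerate kw.keys).foldl (fun d q => d.insert q.2 q.1) PySem.Dict.empty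
  let n : Int := PySem.List.len order
  -- keys = sorted(keywords, key=lambda k: (pos.get(k, n), tie[k]))   (every k is a key of tie)
  let keys := PySem.List.sorted2 kw.keys (fun k => pos.getD k n) (fun k => (tie.get? k).getD 0)
  -- OrderedDict((k, keywords[k]) for k in keys)  (keys are distinct; each k present with a non-None value)
  keys.map (fun k => (k, ((kw.get? k).getD none).getD ""))

-- ===== PRECONDITION & SPEC =====
-- Pre_ excludes association lists with duplicate keys: Python's `keywords` parameter is a dict,
-- which cannot hold a duplicate key, so such lists do not encode any input A actually receives.
def Pre_sorted_keywords_by_order (keywords : List (String × Option String)) (order : List String) : Prop :=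
  (keywords.map Prod.fst).Nodup
instance (keywords : List (String × Option String)) (order : List String) : Decidable (Pre_sorted_keywords_by_order keywords order) := by unfold Pre_sorted_keywords_by_order; infer_instance
def pvWitness_sorted_keywords_by_order : (List (String × Option String)) × List String :=
  ([("hazard", some "flood"), ("extra", none), ("source", some "osm")], ["source", "hazard"])
def Spec_sorted_keywords_by_order (keywords : List (String × Option String)) (order : List String) (out : List (String × String)) : Prop := out = sorted_keywords_by_order_alt keywords order
instance (keywords : List (String × Option String)) (order : List String) (out : List (String × String)) : Decidable (Spec_sorted_keywords_by_order keywords order out) := by unfold Spec_sorted_keywords_by_order; infer_instance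

-- ===== CLAIM (what is proved, stated in full; the proofs are below) =====
def Claim_equal_sorted_keywords_by_order : Prop := ∀ (keywords : List (String × Option String)) (order : List String), Dom_sorted_keywords_by_order keywords order → Pre_sorted_keywords_by_order keywords order → Spec_sorted_keywords_by_order keywords order (sorted_keywords_by_order keywords order)

-- ===== LEMMAS AND PROOFS =====

-- The surviving dict: `keywords` with its None-valued pairs removed.
def pvKwD (keywords : List (String × Option String)) : PySem.Dict String (Option String) :=
  PySem.Dict.mk (keywords.filter (fun p => !(p.2 == none)))

-- Its keys and the value both ports read for a surviving key.
def pvKs (keywords : List (String × Option String)) : List String := (pvKwD keywords).keys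

def pvVal (keywords : List (String × Option String)) (k : String) : String :=
  (((pvKwD keywords).get? k).getD none).getD ""

-- first-occurrence index, with the length as default for absent elements
def pvFIdx (l : List String) (k : String) : Nat := (List.idxOf? k l).getD l.length


-- ---- generic list/dict lemmas ----

theorem pv_get?_mk_append_single {κ ν : Type} [BEq κ] (l : List (κ × ν)) (x : κ) (v : ν) (k : κ) :
    (PySem.Dict.mk (l ++ [(x, v)])).get? k
      = ((PySem.Dict.mk l).get? k).or (if x == k then some v else none) := by
  simp only [PySem.Dict.get?, List.find?_append]
  cases h : List.find? (fun p => p.1 == k) l with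
  | none => cases hxk : x == k <;> simp [List.find?, hxk]
  | some p => simp

theorem pv_contains_false_get? {κ ν : Type} [BEq κ] (d : PySem.Dict κ ν) (k : κ)
    (h : d.contains k = false) : d.get? k = none := by
  have h1 := PySem.Dict.contains_eq_isSome_get? d k
  rw [h] at h1
  cases h2 : d.get? k
  · rfl
  · rw [h2] at h1; simp at h1

theorem pv_erase_fold_items {κ ν : Type} [BEq κ] (ksl : List κ) (d : PySem.Dict κ ν) :
    (ksl.foldl (fun d k => d.erase k) d).items = d.items.filter (fun p => !ksl.contains p.1) := by
  induction ksl generalizing d with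
  | nil => simp
  | cons k t ih =>
    rw [List.foldl_cons, ih, PySem.Dict.erase, List.filter_filter]
    apply List.filter_congr
    intro p _
    simp only [List.contains_cons]
    cases hpk : p.1 == k <;> simp

theorem pv_fIdx_cons_self (x : String) (l : List String) : pvFIdx (x :: l) x = 0 := by
  simp [pvFIdx, List.idxOf?_cons]

theorem pv_fIdx_cons_ne {x b : String} (l : List String) (h : b ≠ x) :
    pvFIdx (x :: l) b = pvFIdx l b + 1 := by
  have hxb : (x == b) = false := by simp [Ne.symm h]
  simp only [pvFIdx, List.idxOf?_cons, hxb, Bool.false_eq_true, if_false]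
  cases hi : List.idxOf? b l <;> simp [List.length_cons]

theorem pv_dedup_pairwise (l : List String) :
    (PySem.List.dedup l).Pairwise (fun a b => pvFIdx l a < pvFIdx l b) := by
  induction l with
  | nil => simp [PySem.List.dedup, PySem.Set.ofList]
  | cons x t ih =>
    simp only [PySem.List.dedup_eq_ofList] at *
    rw [PySem.Set.ofList_cons]
    constructor
    · intro b hb
      rw [PySem.Set.mem_discard] at hb
      obtain ⟨hbs, hbne⟩ := hb
      rw [pv_fIdx_cons_self, pv_fIdx_cons_ne t hbne]
      omega
    · have hsub : ((PySem.Set.ofList t).discard x).Sublist (PySem.Set.ofList t) := by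
        simp only [PySem.Set.discard]
        exact List.filter_sublist
      have hpw := List.Pairwise.sublist hsub ih
      rw [List.Pairwise.and_mem] at hpw ⊢
      refine hpw.imp ?_
      rintro a b ⟨ha, hb, hlt⟩
      have ha' := ha
      have hb' := hb
      rw [PySem.Set.mem_discard] at ha' hb'
      refine ⟨ha, hb, ?_⟩
      rw [pv_fIdx_cons_ne t ha'.2, pv_fIdx_cons_ne t hb'.2]
      omega

theorem pv_dedup_filter (q : String → Bool) (l : List String) :
    PySem.List.dedup (l.filter q) = (PySem.List.dedup l).filter q := by
  induction l with
  | nil => simp [PySem.List.dedup, PySem.Set.ofList]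
  | cons x t ih =>
    simp only [PySem.List.dedup_eq_ofList] at *
    cases hqx : q x with
    | true =>
      rw [List.filter_cons_of_pos hqx, PySem.Set.ofList_cons, PySem.Set.ofList_cons,
        List.filter_cons_of_pos hqx]
      congr 1
      simp only [PySem.Set.discard, ih, List.filter_filter]
      apply List.filter_congr; intro a _; cases h1 : a == x <;> simp [Bool.and_comm]
    | false =>
      rw [List.filter_cons_of_neg (by simp [hqx]), PySem.Set.ofList_cons,
        List.filter_cons_of_neg (by simp [hqx]), ih]
      simp only [PySem.Set.discard, List.filter_filter]
      symm
      apply List.filter_congr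
      intro a ha
      cases hax : a == x with
      | true =>
        have h2 : a = x := by simpa using hax
        rw [h2, hqx]
        simp
      | false => simp

theorem pv_enum_cons (x : String) (t : List String) (s : Int) :
    PySem.List.enumerate (x :: t) s = (s, x) :: PySem.List.enumerate t (s + 1) := rfl

-- pos: a setdefault loop over enumerate stores each key's FIRST index
theorem pv_setdefault_enum_get? (l : List String) (s : Int) (d : PySem.Dict String Int) (k : String) :
    ((PySem.List.enumerate l s).foldl (fun d q => d.setdefault q.2 q.1) d).get? k
      = (d.get? k).or ((List.idxOf? k l).map (fun i => (i : Int) + s)) := by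
  induction l generalizing s d with
  | nil => simp [PySem.List.enumerate]
  | cons x t ih =>
    rw [pv_enum_cons, List.foldl_cons, ih]
    by_cases hxk : x = k
    · subst hxk
      cases hc : d.contains x with
      | true =>
        have hd : d.setdefault x s = d := by simp [PySem.Dict.setdefault, hc]
        rw [hd]
        have h1 : (d.get? x).isSome := by rw [← PySem.Dict.contains_eq_isSome_get?, hc]
        obtain ⟨v, hv⟩ := Option.isSome_iff_exists.mp h1
        simp [hv, Option.or]
      | false =>
        have hd : d.setdefault x s = PySem.Dict.mk (d.items ++ [(x, s)]) := by
          simp [PySem.Dict.setdefault, hc]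
        rw [hd]
        have h1 : PySem.Dict.mk d.items = d := rfl
        rw [pv_get?_mk_append_single d.items x s x, h1, pv_contains_false_get? d x hc]
        simp [List.idxOf?_cons]
    · have hd : (d.setdefault x s).get? k = d.get? k := by
        simp only [PySem.Dict.setdefault]
        cases hc : d.contains x
        · simp only [Bool.false_eq_true, if_false]
          have h1 : PySem.Dict.mk d.items = d := rfl
          rw [show ({ items := d.items ++ [(x, s)] } : PySem.Dict String Int) = PySem.Dict.mk (d.items ++ [(x, s)]) from rfl]
          rw [pv_get?_mk_append_single, h1]
          have hxk' : (x == k) = false := by simp [hxk]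
          simp [hxk']
        · simp
      rw [hd]
      have hxk' : (x == k) = false := by simp [hxk]
      rw [List.idxOf?_cons]
      simp only [hxk', Bool.false_eq_true, if_false]
      cases h2 : List.idxOf? k t with
      | none => simp
      | some v =>
        have h4 : ((v : Int) + (s + 1)) = ((v + 1 : Nat) : Int) + s := by push_cast; ring
        simp [h4]

-- tie: an insert loop over enumerate of a Nodup list stores each key's index
theorem pv_insert_enum_get? (l : List String) (s : Int) (d : PySem.Dict String Int) (k : String)
    (hnd : l.Nodup) (hfresh : ∀ j ∈ l, d.contains j = false) :
    ((PySem.List.enumerate l s).foldl (fun d q => d.insert q.2 q.1) d).get? k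
      = (d.get? k).or ((List.idxOf? k l).map (fun i => (i : Int) + s)) := by
  induction l generalizing s d with
  | nil => simp [PySem.List.enumerate]
  | cons x t ih =>
    rw [pv_enum_cons, List.foldl_cons]
    have hcx : d.contains x = false := hfresh x (by simp)
    have hitems : (d.insert x s).items = d.items ++ [(x, s)] :=
      PySem.Dict.items_insert_of_not_contains d s hcx
    have hd' : d.insert x s = PySem.Dict.mk (d.items ++ [(x, s)]) := by
      cases hins : d.insert x s
      rw [hins] at hitems
      simp only at hitems
      rw [hitems]
    have hget' : ∀ j, (d.insert x s).get? j = (d.get? j).or (if x == j then some s else none) := by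
      intro j
      rw [hd', pv_get?_mk_append_single d.items x s j]
    have hfresh' : ∀ j ∈ t, (d.insert x s).contains j = false := by
      intro j hj
      have hne : x ≠ j := by
        rintro rfl
        exact (List.nodup_cons.mp hnd).1 hj
      have h1 : (d.insert x s).get? j = none := by
        rw [hget' j, pv_contains_false_get? d j (hfresh j (by simp [hj]))]
        simp [hne]
      rw [PySem.Dict.contains_eq_isSome_get?, h1]
      rfl
    rw [ih (s + 1) (d.insert x s) (List.nodup_cons.mp hnd).2 hfresh', hget' k]
    by_cases hxk : x = k
    · subst hxk
      rw [pv_contains_false_get? d x hcx]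
      simp [List.idxOf?_cons]
    · have hxk' : (x == k) = false := by simp [hxk]
      rw [List.idxOf?_cons]
      simp only [hxk', Bool.false_eq_true, if_false]
      rw [Option.or_none]
      cases h2 : List.idxOf? k t with
      | none => simp
      | some v =>
        have h4 : ((v : Int) + (s + 1)) = ((v + 1 : Nat) : Int) + s := by push_cast; ring
        simp [h4]

-- A's first ordered loop, characterised
theorem pv_ordered_loop (ks : List String) (val : String → String) (ord : List String) :
    (ord.foldl (fun od key => if key ∈ ks then od.insert key (val key) else od) PySem.Dict.empty).items
      = (PySem.List.dedup (ord.filter (fun k => decide (k ∈ ks)))).map (fun k => (k, val k)) := by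
  induction ord using List.reverseRecOn with
  | nil => simp [PySem.Dict.empty, PySem.List.dedup, PySem.Set.ofList]
  | append_singleton xs k ih =>
    rw [List.foldl_append, List.foldl_cons, List.foldl_nil, List.filter_append]
    by_cases hk : k ∈ ks
    · rw [if_pos hk]
      have hfk : List.filter (fun k => decide (k ∈ ks)) [k] = [k] := by simp [hk]
      rw [hfk]
      set od := xs.foldl (fun od key => if key ∈ ks then od.insert key (val key) else od) PySem.Dict.empty with hod
      set dl := PySem.List.dedup (xs.filter (fun k => decide (k ∈ ks))) with hdl
      have hkeys : od.keys = dl := by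
        rw [PySem.Dict.keys, ih, List.map_map]
        simp [Function.comp_def]
      rw [PySem.List.dedup_eq_ofList, PySem.Set.ofList_append_singleton, PySem.Set.add_eq_ite,
        ← PySem.List.dedup_eq_ofList, ← hdl]
      by_cases hmem : k ∈ dl
      · rw [if_pos hmem]
        have hc : od.contains k = true := by
          rw [PySem.Dict.contains_iff_mem_keys, hkeys]; exact hmem
        rw [PySem.Dict.items_insert_of_contains od (val k) hc, ih, List.map_map]
        apply List.map_congr_left
        intro a ha
        by_cases hak : a = k
        · subst hak; simp
        · have h2 : (a == k) = false := by simp [hak]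
          simp [Function.comp, h2]
      · rw [if_neg hmem]
        have hc : od.contains k = false := by
          cases h2 : od.contains k
          · rfl
          · rw [PySem.Dict.contains_iff_mem_keys, hkeys] at h2; exact absurd h2 hmem
        rw [PySem.Dict.items_insert_of_not_contains od (val k) hc, ih, List.map_append]
        simp
    · rw [if_neg hk]
      have hfk : List.filter (fun k => decide (k ∈ ks)) [k] = [] := by simp [hk]
      rw [hfk, List.append_nil]
      exact ih

-- substituting tuple sort keys bounded as (p, t), 0 <= t < M, by the single key p*M + t
theorem pv_sorted2_eq_sorted {α : Type} (xs : List α) (p t : α → Int) (M : Int)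
    (hb : ∀ k, 0 ≤ t k ∧ t k < M) :
    PySem.List.sorted2 xs p t = PySem.List.sorted xs (fun k => p k * M + t k) := by
  simp only [PySem.List.sorted2, PySem.List.sorted]
  have hfun : (fun a b => decide (p a < p b) || (!decide (p b < p a) && decide (t a < t b)))
      = (fun a b => decide (p a * M + t a < p b * M + t b)) := by
    funext a b
    obtain ⟨hta0, htaM⟩ := hb a
    obtain ⟨htb0, htbM⟩ := hb b
    rcases lt_trichotomy (p a) (p b) with h | h | h
    · have hK : p a * M + t a < p b * M + t b := by
        have h1 : (p a + 1) * M ≤ p b * M :=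
          mul_le_mul_of_nonneg_right (by omega) (by omega)
        nlinarith
      simp [h, hK]
    · have hm : p a * M = p b * M := by rw [h]
      have hiff : (p a * M + t a < p b * M + t b) ↔ (t a < t b) :=
        ⟨fun h2 => by linarith, fun h2 => by linarith⟩
      have hnb : ¬ p b < p a := by omega
      have hna : ¬ p a < p b := by omega
      simp [hna, hnb, hiff]
    · have h1 : (p b + 1) * M ≤ p a * M :=
        mul_le_mul_of_nonneg_right (by omega) (by omega)
      have hK : ¬ (p a * M + t a < p b * M + t b) := by nlinarith
      have hna : ¬ p a < p b := by omega
      simp [hna, h, hK]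
  simp only [Bool.false_eq_true, if_false]
  rw [hfun]

-- ---- facts about the shared pieces ----

theorem pv_kwB_eq (keywords : List (String × Option String))
    (hnd : (keywords.map Prod.fst).Nodup) :
    ((keywords.filter (fun kv => kv.2 == none)).map (fun kv => kv.1)).foldl
        (fun d k => d.erase k) (PySem.Dict.mk keywords)
      = pvKwD keywords := by
  apply PySem.Dict.ext
  rw [pv_erase_fold_items]
  have h1 : (PySem.Dict.mk keywords).items = keywords := rfl
  rw [h1]
  apply List.filter_congr
  intro p hp
  set delKeys := (keywords.filter (fun kv => kv.2 == none)).map (fun kv => kv.1) with hdk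
  cases hv : p.2 == none with
  | true =>
    have hin : p.1 ∈ delKeys := by
      rw [hdk]
      exact List.mem_map_of_mem (List.mem_filter.mpr ⟨hp, hv⟩)
    simp [hin]
  | false =>
    have hnotin : p.1 ∉ delKeys := by
      rw [hdk]
      intro hmem
      obtain ⟨q, hq, hq1⟩ := List.mem_map.mp hmem
      have hq' := List.mem_filter.mp hq
      have hpq : q = p := List.inj_on_of_nodup_map hnd hq'.1 hp hq1
      rw [hpq] at hq'
      rw [hq'.2] at hv
      cases hv
    simp [hnotin]

theorem pv_kwA_eq (keywords : List (String × Option String))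
    (hnd : (keywords.map Prod.fst).Nodup) :
    keywords.foldl (fun d kv => if kv.2 == none then d.erase kv.1 else d) (PySem.Dict.mk keywords)
      = pvKwD keywords := by
  rw [← pv_kwB_eq keywords hnd, List.foldl_map, List.foldl_filter]

theorem pv_ks_nodup (keywords : List (String × Option String))
    (hnd : (keywords.map Prod.fst).Nodup) : (pvKs keywords).Nodup := by
  have hsub : (pvKs keywords).Sublist (keywords.map Prod.fst) := by
    unfold pvKs pvKwD
    exact List.Sublist.map Prod.fst List.filter_sublist
  exact hsub.nodup hnd

-- ---- main assembly ----

theorem pv_main (keywords : List (String × Option String)) (order : List String)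
    (hnd : (keywords.map Prod.fst).Nodup) :
    sorted_keywords_by_order keywords order = sorted_keywords_by_order_alt keywords order := by
  simp only [sorted_keywords_by_order, sorted_keywords_by_order_alt]
  rw [pv_kwA_eq keywords hnd, pv_kwB_eq keywords hnd]
  set ks := (pvKwD keywords).keys with hks
  set val : String → String := fun k => (((pvKwD keywords).get? k).getD none).getD "" with hval
  have hksnd : ks.Nodup := pv_ks_nodup keywords hnd
  -- A side: rewrite the second loop as a fold of fresh inserts over the non-order keys
  have hstep2 : (fun (od : PySem.Dict String String) k => if k ∈ order then od else od.insert k (val k))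
      = (fun (od : PySem.Dict String String) k => if (!decide (k ∈ order)) = true then od.insert k (val k) else od) := by
    funext od k
    by_cases h : k ∈ order <;> simp [h]
  rw [hstep2, ← List.foldl_filter]
  set filtered := ks.filter (fun k => !decide (k ∈ order)) with hfiltered
  set ordered := order.foldl (fun od key => if key ∈ ks then od.insert key (val key) else od) PySem.Dict.empty with hordered
  set dl := PySem.List.dedup (order.filter (fun k => decide (k ∈ ks))) with hdl
  have hordered_items : ordered.items = dl.map (fun k => (k, val k)) := pv_ordered_loop ks val order
  have hkeys : ordered.keys = dl := by
    rw [PySem.Dict.keys, hordered_items, List.map_map]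
    simp [Function.comp_def]
  have hmem_dl : ∀ a, a ∈ dl ↔ a ∈ order ∧ a ∈ ks := by
    intro a
    rw [hdl]
    simp [List.mem_filter]
  have hfl : ∀ a ∈ filtered, ordered.contains a = false := by
    intro a ha
    have hano : a ∉ order := by
      have := (List.mem_filter.mp ha).2
      simpa using this
    cases hc : ordered.contains a
    · rfl
    · exfalso
      rw [PySem.Dict.contains_iff_mem_keys, hkeys, hmem_dl] at hc
      exact hano hc.1
  have hfn : (filtered.map (fun a => a)).Nodup := by
    rw [List.map_id']
    exact hksnd.filter _
  rw [PySem.Dict.items_foldl_insert_fresh filtered (fun a => a) val ordered hfl hfn, hordered_items]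
  -- B side: the stable sort produces exactly dl ++ filtered
  set posD := (PySem.List.enumerate order).foldl (fun d q => d.setdefault q.2 q.1) PySem.Dict.empty with hposD
  set tieD := (PySem.List.enumerate ks).foldl (fun d q => d.insert q.2 q.1) PySem.Dict.empty with htieD
  set pfun : String → Int := fun k => posD.getD k (PySem.List.len order) with hpfun
  set tfun : String → Int := fun k => (tieD.get? k).getD 0 with htfun
  by_cases hksnil : ks = []
  · rw [hfiltered, hdl, hksnil]
    simp [PySem.List.sorted2, PySem.List.dedup, PySem.Set.ofList]
  · have hM : 0 < (ks.length : Int) := by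
      have h1 : ks.length ≠ 0 := by simpa using hksnil
      omega
    have hpos : ∀ k, posD.get? k = (List.idxOf? k order).map (fun i => (i : Int)) := by
      intro k
      rw [hposD, pv_setdefault_enum_get? order 0 PySem.Dict.empty k]
      simp
    have htie : ∀ k, tieD.get? k = (List.idxOf? k ks).map (fun i => (i : Int)) := by
      intro k
      rw [htieD, pv_insert_enum_get? ks 0 PySem.Dict.empty k hksnd
        (by intro j hj; simp [PySem.Dict.contains_empty])]
      simp
    have hnI : PySem.List.len order = (order.length : Int) := rfl
    have hb : ∀ k, 0 ≤ tfun k ∧ tfun k < (ks.length : Int) := by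
      intro k
      have h1 : tfun k = ((List.idxOf? k ks).map (fun i => (i : Int))).getD 0 := by
        rw [htfun]
        simp only
        rw [htie k]
      rw [h1]
      cases h : List.idxOf? k ks with
      | none => simpa using hM
      | some i =>
        obtain ⟨hlt, -⟩ := List.idxOf?_eq_some_iff.mp h
        simp
        omega
    have hp_mem : ∀ a ∈ order, pfun a = (pvFIdx order a : Int) := by
      intro a ha
      rw [hpfun]
      simp only
      rw [PySem.Dict.getD_eq_get?_getD, hpos a]
      cases h : List.idxOf? a order with
      | none => exact absurd (List.idxOf?_eq_none_iff.mp h) (by simpa using ha)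
      | some i => simp [pvFIdx, h]
    have hp_lt : ∀ a ∈ order, pfun a < (order.length : Int) := by
      intro a ha
      rw [hp_mem a ha]
      have h2 : pvFIdx order a < order.length := by
        unfold pvFIdx
        cases h : List.idxOf? a order with
        | none => exact absurd (List.idxOf?_eq_none_iff.mp h) (by simpa using ha)
        | some i =>
          obtain ⟨hlt, -⟩ := List.idxOf?_eq_some_iff.mp h
          simpa using hlt
      exact_mod_cast h2
    have hp_nmem : ∀ a, a ∉ order → pfun a = (order.length : Int) := by
      intro a ha
      rw [hpfun]
      simp only
      rw [PySem.Dict.getD_eq_get?_getD, hpos a, List.idxOf?_eq_none_iff.mpr ha, hnI]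
      rfl
    have ht_mem : ∀ a ∈ ks, tfun a = (pvFIdx ks a : Int) := by
      intro a ha
      rw [htfun]
      simp only
      rw [htie a]
      cases h : List.idxOf? a ks with
      | none => exact absurd (List.idxOf?_eq_none_iff.mp h) (by simpa using ha)
      | some i => simp [pvFIdx, h]
    have hKlt1 : ∀ a b : String, pfun a < pfun b →
        pfun a * (ks.length : Int) + tfun a < pfun b * (ks.length : Int) + tfun b := by
      intro a b hab
      obtain ⟨ha0, haM⟩ := hb a
      obtain ⟨hb0, hbM⟩ := hb b
      have h1 : (pfun a + 1) * (ks.length : Int) ≤ pfun b * (ks.length : Int) :=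
        mul_le_mul_of_nonneg_right (by omega) (by omega)
      nlinarith
    have hKlt2 : ∀ a b : String, pfun a = pfun b → tfun a < tfun b →
        pfun a * (ks.length : Int) + tfun a < pfun b * (ks.length : Int) + tfun b := by
      intro a b he hab
      have hm : pfun a * (ks.length : Int) = pfun b * (ks.length : Int) := by rw [he]
      linarith
    have hdl_nodup : dl.Nodup := by rw [hdl]; exact PySem.List.nodup_dedup _
    have hperm1 : dl.Perm (ks.filter (fun k => decide (k ∈ order))) := by
      rw [List.perm_ext_iff_of_nodup hdl_nodup (hksnd.filter _)]
      intro a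
      rw [hmem_dl a]
      simp [List.mem_filter]
      tauto
    have hperm : (dl ++ filtered).Perm ks := by
      refine (hperm1.append_right filtered).trans ?_
      rw [hfiltered]
      exact List.filter_append_perm _ ks
    have hpw : (dl ++ filtered).Pairwise (fun a b =>
        pfun a * (ks.length : Int) + tfun a < pfun b * (ks.length : Int) + tfun b) := by
      rw [List.pairwise_append]
      refine ⟨?_, ?_, ?_⟩
      · have h0 := pv_dedup_pairwise order
        have hsub : dl.Sublist (PySem.List.dedup order) := by
          rw [hdl, pv_dedup_filter]
          exact List.filter_sublist
        have h1 := List.Pairwise.sublist hsub h0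
        rw [List.Pairwise.and_mem] at h1 ⊢
        refine h1.imp ?_
        rintro a b ⟨ha, hb', hlt⟩
        refine ⟨ha, hb', ?_⟩
        have hao : a ∈ order := ((hmem_dl a).mp ha).1
        have hbo : b ∈ order := ((hmem_dl b).mp hb').1
        apply hKlt1
        rw [hp_mem a hao, hp_mem b hbo]
        exact_mod_cast hlt
      · have h0 := pv_dedup_pairwise ks
        rw [PySem.List.dedup_eq_ofList, PySem.Set.ofList_eq_self_of_nodup ks hksnd] at h0
        have hsubf : filtered.Sublist ks := by
          rw [hfiltered]
          exact List.filter_sublist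
        have h1 := List.Pairwise.sublist hsubf h0
        rw [List.Pairwise.and_mem] at h1 ⊢
        refine h1.imp ?_
        rintro a b ⟨ha, hb', hlt⟩
        refine ⟨ha, hb', ?_⟩
        have hamem := ha; have hbmem := hb'
        rw [hfiltered, List.mem_filter] at hamem hbmem
        have hano : a ∉ order := by simpa using hamem.2
        have hbno : b ∉ order := by simpa using hbmem.2
        apply hKlt2
        · rw [hp_nmem a hano, hp_nmem b hbno]
        · rw [ht_mem a hamem.1, ht_mem b hbmem.1]
          exact_mod_cast hlt
      · intro a ha b hb'
        have hao : a ∈ order := ((hmem_dl a).mp ha).1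
        have hbmem := hb'
        rw [hfiltered, List.mem_filter] at hbmem
        have hbno : b ∉ order := by simpa using hbmem.2
        apply hKlt1
        rw [hp_nmem b hbno]
        exact hp_lt a hao
    rw [pv_sorted2_eq_sorted ks pfun tfun (ks.length : Int) hb,
      PySem.List.sorted_eq_of_perm_of_pairwise_lt ks (dl ++ filtered) _ hperm hpw,
      List.map_append]

-- ===== VERDICT (by name: the statement is the Claim_ definition above) =====
theorem sorted_keywords_by_order_spec : Claim_equal_sorted_keywords_by_order := by
  intro keywords order _hdom hpre
  unfold Spec_sorted_keywords_by_order
  exact pv_main keywords order hpre
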